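-- pv_equiv track=rewrite | github.com/robolab-pavia/slr-kit | utils.py | substring_index
-- ===== SOURCE A (Python) =====
-- import string
--
-- def substring_index(haystack, needle, delim=string.whitespace):
--     """
--     Generator function that give the slices of haystack where needle is found
--
--     needle is considered found if it is between two word boundaries.
--     Example:
--     haystack = 'the rate monotonic scheduling algorithm to meet the deadlines'
--     needle = 'to'
--     the generator yields only the 'to' between 'algorithm' and 'meet' not the
--     'to' inside 'monoTOnic'.
--     delim specify which characters are to be considered boundaries of a word.
--     Default uses all whitespace characters
--     The values yielded are in the form of a tuple (begin, end) with
--     haystack[begin:end] == needle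
--     If needle is not found the generator raises immediately StopIteration
--     :param haystack: the string to examine
--     :type haystack: str
--     :param needle: the string to search
--     :type needle: str
--     :param delim: character used as word boundaries
--     :type delim: str or list[str]
--     :return: a generator that yields the slice indexes where needle is found
--     """
--     if needle == '':
--         return
--
--     if haystack == needle:
--         yield (0, len(haystack))
--         return
--
--     if isinstance(delim, list):
--         delim = ''.join(delim)
--
--     start = 0
--     idx = haystack.find(needle, start)
--     while idx >= 0:
--         start = idx + len(needle)
--         if idx == 0:
--             if haystack[len(needle)] in delim:
--                 yield (0, len(needle))
--         elif haystack[idx - 1] in delim: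
--             if idx + len(needle) == len(haystack):
--                 yield (idx, len(haystack))
--                 return
--             elif haystack[idx + len(needle)] in delim:
--                 yield (idx, idx + len(needle))
--
--         idx = haystack.find(needle, start)
-- ===== SOURCE B (Python) =====
-- import string
--
-- def substring_index(haystack, needle, delim=string.whitespace):
--     # Different decomposition: first collect the non-overlapping occurrence
--     # positions by a direct slice-compare scan, then yield those that pass a
--     # single symmetric word-boundary predicate.
--     if needle == '':
--         return
--     if haystack == needle:
--         yield (0, len(haystack))
--         return
--     if isinstance(delim, list):
--         delim = ''.join(delim)
--     n = len(needle)
--     m = len(haystack)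
--     cands = []
--     i = 0
--     while i + n <= m:
--         if haystack[i:i + n] == needle:
--             cands.append(i)
--             i += n
--         else:
--             i += 1
--     for idx in cands:
--         if (idx == 0 or haystack[idx - 1] in delim) and \
--            (idx + n == m or haystack[idx + n] in delim):
--             yield (idx, idx + n)
-- ===== Notes on version B (the rewrite author's own statement) =====
-- stated objective: alternative
-- what changed: A interleaves str.find with a nested asymmetric branch ladder (special idx==0 case, early return at end-of-string); B first collects the non-overlapping occurrence positions with a slice-compare scan and then filters them through one symmetric boundary predicate (start-or-delim before, end-or-delim after).
import Mathlib
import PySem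

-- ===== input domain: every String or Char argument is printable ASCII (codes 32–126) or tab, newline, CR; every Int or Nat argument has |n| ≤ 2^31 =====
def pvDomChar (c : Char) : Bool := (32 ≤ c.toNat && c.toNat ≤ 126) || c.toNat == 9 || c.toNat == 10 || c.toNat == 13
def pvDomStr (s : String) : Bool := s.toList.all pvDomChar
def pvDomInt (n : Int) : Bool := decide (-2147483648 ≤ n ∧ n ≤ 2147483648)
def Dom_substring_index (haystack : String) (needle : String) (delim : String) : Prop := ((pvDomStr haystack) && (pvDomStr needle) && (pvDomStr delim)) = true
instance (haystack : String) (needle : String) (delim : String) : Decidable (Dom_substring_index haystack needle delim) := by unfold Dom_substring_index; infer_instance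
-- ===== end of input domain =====

-- B restructures A's find/branch-ladder loop into a slice-compare occurrence scan followed by one
-- symmetric boundary filter (objective: alternative decomposition, same cost). Return value only:
-- the Pythons are generators, compared as the list of yielded pairs.

-- ===== PORT A =====
-- Python's `haystack[k] in delim` (both programs use this very expression; k always in range where
-- either program evaluates it, `none` kept as false only as a totalization guard). Exact for the
-- in-range case: a 1-character `in` test is membership.
def pvCharIn (h : List Char) (k : Int) (d : List Char) : Bool :=
  match PySem.List.pyGet? h k with
  | some c => d.contains c
  | none => false

-- A's `while idx >= 0` loop; state = start, idx recomputed by haystack.find(needle, start).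
-- fuel (h.length + 1) only totalizes: start strictly increases and stays ≤ h.length.
def pvFindLoop (h nd d : List Char) : Nat → Nat → List (Int × Int)
  | 0, _ => []
  | fuel+1, start =>
    let idx := PySem.Chars.findFrom h nd (start : Int)
    if idx < 0 then []
    else
      let i := idx.toNat
      if i = 0 then
        (if pvCharIn h (nd.length : Int) d then [((0 : Int), (nd.length : Int))] else [])
          ++ pvFindLoop h nd d fuel (i + nd.length)
      else if pvCharIn h ((i : Int) - 1) d then
        if i + nd.length = h.length then [((i : Int), (h.length : Int))]
        else if pvCharIn h ((i + nd.length : Nat) : Int) d then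
          ((i : Int), ((i + nd.length : Nat) : Int)) :: pvFindLoop h nd d fuel (i + nd.length)
        else pvFindLoop h nd d fuel (i + nd.length)
      else pvFindLoop h nd d fuel (i + nd.length)

def substring_index (haystack : String) (needle : String) (delim : String) : List (Int × Int) :=
  if needle = "" then []
  else if haystack = needle then [((0 : Int), (PySem.Str.len haystack : Int))]
  else pvFindLoop haystack.toList needle.toList delim.toList (haystack.toList.length + 1) 0

-- ===== PORT B =====
-- Source B's candidate scan: `while i+n <= m: if haystack[i:i+n] == needle: append i; i += n else i += 1`.
-- fuel (h.length + 1) only totalizes the while loop.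
def pvScanCands (h nd : List Char) : Nat → Nat → List Nat
  | 0, _ => []
  | fuel+1, i =>
    if i + nd.length ≤ h.length then
      if PySem.List.slice h (some (i : Int)) (some ((i + nd.length : Nat) : Int)) = nd then
        i :: pvScanCands h nd fuel (i + nd.length)
      else pvScanCands h nd fuel (i + 1)
    else []

-- Source B's boundary test: (idx == 0 or haystack[idx-1] in delim) and (idx+n == m or haystack[idx+n] in delim)
def pvBoundary (h nd d : List Char) (i : Nat) : Bool :=
  (i == 0 || pvCharIn h ((i : Int) - 1) d) &&
  (i + nd.length == h.length || pvCharIn h ((i + nd.length : Nat) : Int) d)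

def substring_index_alt (haystack : String) (needle : String) (delim : String) : List (Int × Int) :=
  if needle = "" then []
  else if haystack = needle then [((0 : Int), (PySem.Str.len haystack : Int))]
  else
    (pvScanCands haystack.toList needle.toList (haystack.toList.length + 1) 0).filterMap fun i =>
      if pvBoundary haystack.toList needle.toList delim.toList i then
        some ((i : Int), ((i + needle.toList.length : Nat) : Int))
      else none

-- ===== PRECONDITION & SPEC =====
def Spec_substring_index (haystack : String) (needle : String) (delim : String) (out : List (Int × Int)) : Prop := out = substring_index_alt haystack needle delim
instance (haystack : String) (needle : String) (delim : String) (out : List (Int × Int)) : Decidable (Spec_substring_index haystack needle delim out) := by unfold Spec_substring_index; infer_instance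

-- ===== CLAIM (what is proved, stated in full; the proofs are below) =====
def Claim_equal_substring_index : Prop := ∀ (haystack : String) (needle : String) (delim : String), Dom_substring_index haystack needle delim → Spec_substring_index haystack needle delim (substring_index haystack needle delim)

-- ===== LEMMAS AND PROOFS =====

theorem pv_infix_drop_mono (nd h : List Char) (i k : Nat)
    (hx : nd <:+: h.drop (i + k)) : nd <:+: h.drop i := by
  have heq : h.drop (i + k) = (h.drop i).drop k := by rw [List.drop_drop, Nat.add_comm]
  exact hx.trans (heq ▸ List.drop_suffix k (h.drop i)).isInfix

theorem pv_scan_stop (h nd : List Char) (fuel i : Nat)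
    (hl : h.length < i + nd.length) : pvScanCands h nd fuel i = [] := by
  cases fuel with
  | zero => rfl
  | succ f => simp only [pvScanCands, if_neg (by omega : ¬ i + nd.length ≤ h.length)]

theorem pv_scan_no_match (h nd : List Char) (fuel : Nat) :
    ∀ i, ¬ nd <:+: h.drop i → pvScanCands h nd fuel i = [] := by
  induction fuel with
  | zero => intro i _; rfl
  | succ fuel ih =>
    intro i hx
    simp only [pvScanCands]
    split
    · next hle =>
      have hslice : PySem.List.slice h (some (i : Int)) (some ((i + nd.length : Nat) : Int)) ≠ nd := by
        intro hc
        rw [PySem.List.slice_natCast] at hc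
        have : nd <+: h.drop i := by
          rw [List.prefix_iff_eq_take]
          have : i + nd.length - i = nd.length := by omega
          rw [this] at hc
          exact hc.symm
        exact hx this.isInfix
      rw [if_neg hslice]
      exact ih (i + 1) (fun hc => hx (pv_infix_drop_mono nd h i 1 hc))
    · rfl

theorem pv_scan_fuel (h nd : List Char) (hn : 1 ≤ nd.length) (fuel₁ : Nat) :
    ∀ fuel₂ i, h.length + 1 ≤ fuel₁ + i → h.length + 1 ≤ fuel₂ + i →
      pvScanCands h nd fuel₁ i = pvScanCands h nd fuel₂ i := by
  induction fuel₁ with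
  | zero =>
    intro fuel₂ i h1 _
    rw [pv_scan_stop h nd fuel₂ i (by omega)]
    rfl
  | succ fuel₁ ih =>
    intro fuel₂ i h1 h2
    cases fuel₂ with
    | zero =>
      rw [pv_scan_stop h nd (fuel₁ + 1) i (by omega)]
      rfl
    | succ fuel₂ =>
      simp only [pvScanCands]
      split
      · next hle =>
        split
        · rw [ih fuel₂ (i + nd.length) (by omega) (by omega)]
        · rw [ih fuel₂ (i + 1) (by omega) (by omega)]
      · rfl

theorem pv_scan_found (h nd : List Char) (hn : 1 ≤ nd.length) (fuel : Nat) :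
    ∀ i j, i ≤ j → nd <+: h.drop j → (∀ k, i ≤ k → k < j → ¬ nd <+: h.drop k) →
      h.length + 1 ≤ fuel + i →
      pvScanCands h nd fuel i = j :: pvScanCands h nd fuel (j + nd.length) := by
  induction fuel with
  | zero =>
    intro i j hij hpre _ hf
    have := hpre.length_le
    rw [List.length_drop] at this
    omega
  | succ fuel ih =>
    intro i j hij hpre hmin hf
    have hjl : j + nd.length ≤ h.length := by
      have := hpre.length_le
      rw [List.length_drop] at this
      omega
    rcases Nat.lt_or_ge i j with hlt | hge
    · -- no match at i: step to i+1
      have hile : i + nd.length ≤ h.length := by omega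
      have hnm : ¬ nd <+: h.drop i := hmin i le_rfl hlt
      conv_lhs => rw [pvScanCands]
      rw [if_pos hile]
      rw [if_neg (by
        intro hc
        rw [PySem.List.slice_natCast] at hc
        exact hnm (by
          rw [List.prefix_iff_eq_take]
          have he : i + nd.length - i = nd.length := by omega
          rw [he] at hc
          exact hc.symm))]
      rw [ih (i + 1) j (by omega) hpre (fun k hk1 hk2 => hmin k (by omega) hk2) (by omega)]
      rw [pv_scan_fuel h nd hn fuel (fuel + 1) (j + nd.length) (by omega) (by omega)]
    · -- i = j: the match
      have hij' : i = j := by omega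
      subst hij'
      conv_lhs => rw [pvScanCands]
      rw [if_pos hjl]
      rw [if_pos (by
        rw [PySem.List.slice_natCast]
        have he : i + nd.length - i = nd.length := by omega
        rw [he]
        exact ((List.prefix_iff_eq_take).mp hpre).symm)]
      rw [pv_scan_fuel h nd hn fuel (fuel + 1) (i + nd.length) (by omega) (by omega)]

theorem pv_main (h nd d : List Char) (hn : 1 ≤ nd.length) (hne : h ≠ nd) (fuel : Nat) :
    ∀ start, start ≤ h.length → h.length + 1 ≤ fuel + start →
      pvFindLoop h nd d fuel start =
        (pvScanCands h nd fuel start).filterMap fun i =>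
          if pvBoundary h nd d i then some ((i : Int), ((i + nd.length : Nat) : Int)) else none := by
  induction fuel with
  | zero => intro start hs hf; omega
  | succ fuel ih =>
    intro start hs hf
    conv_lhs => rw [pvFindLoop]
    by_cases hneg : PySem.Chars.findFrom h nd (start : Int) = -1
    · rw [pv_scan_no_match h nd (fuel + 1) start
        ((PySem.Chars.findFrom_natCast_eq_neg_one_iff h nd start hs).mp hneg)]
      simp [hneg]
    · obtain ⟨hle, hpre, hmin⟩ := PySem.Chars.findFrom_natCast_spec h nd start hs hneg
      have h0r : (0 : Int) ≤ PySem.Chars.findFrom h nd (start : Int) :=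
        le_trans (Int.natCast_nonneg start) hle
      set j := (PySem.Chars.findFrom h nd (start : Int)).toNat with hj
      have hjs : start ≤ j := by
        have := Int.toNat_of_nonneg h0r
        omega
      have hjl : j + nd.length ≤ h.length := by
        have := hpre.length_le
        rw [List.length_drop] at this
        omega
      rw [pv_scan_found h nd hn (fuel + 1) start j hjs hpre hmin (by omega)]
      rw [List.filterMap_cons]
      rw [pv_scan_fuel h nd hn (fuel + 1) fuel (j + nd.length) (by omega) (by omega)]
      have htail := ih (j + nd.length) (by omega) (by omega)
      rw [if_neg (not_lt.mpr h0r)]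
      by_cases hj0 : j = 0
      · have hLn : nd.length ≠ h.length := by
          intro hc
          have hpre0 : nd <+: h := by simpa [hj0] using hpre
          exact hne (hpre0.eq_of_length hc).symm
        rw [if_pos hj0]
        rw [htail]
        simp only [pvBoundary, hj0]
        cases hcc : pvCharIn h ((nd.length : Nat) : Int) d <;> simp [hcc, hLn]
      · rw [if_neg hj0]
        by_cases hc1 : pvCharIn h ((j : Int) - 1) d
        · rw [if_pos hc1]
          by_cases hc2 : j + nd.length = h.length
          · rw [if_pos hc2]
            rw [pv_scan_stop h nd fuel (j + nd.length) (by omega)]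
            simp [pvBoundary, hc1, hc2]
          · rw [if_neg hc2]
            by_cases hc3 : pvCharIn h ((j + nd.length : Nat) : Int) d
            · rw [if_pos hc3, htail]
              have hb : pvBoundary h nd d j = true := by
                unfold pvBoundary
                rw [hc1, hc3, Bool.or_true, Bool.or_true]
                rfl
              simp [hb]
            · rw [if_neg hc3, htail]
              have hc3f : pvCharIn h ((j + nd.length : Nat) : Int) d = false := by
                simp only [Bool.not_eq_true] at hc3
                exact hc3
              have hb : pvBoundary h nd d j = false := by
                unfold pvBoundary
                rw [hc3f, Bool.or_false]
                have h2 : (j + nd.length == h.length) = false := by simp [hc2]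
                rw [h2, Bool.and_false]
              simp [hb]
        · rw [if_neg hc1, htail]
          simp [pvBoundary, hj0, hc1]

-- ===== VERDICT (by name: the statement is the Claim_ definition above) =====
theorem substring_index_spec : Claim_equal_substring_index := by
  intro haystack needle delim _
  unfold Spec_substring_index substring_index substring_index_alt
  by_cases h0 : needle = ""
  · simp [h0]
  · by_cases h1 : haystack = needle
    · simp [h0, h1]
    · simp only [h0, h1, if_false]
      have hn : 1 ≤ needle.toList.length := by
        rcases Nat.eq_zero_or_pos needle.toList.length with hz | hp
        · exact absurd (by simpa using String.toList_inj.mp (List.length_eq_zero_iff.mp hz ▸ rfl : needle.toList = ("" : String).toList)) h0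
        · exact hp
      have hne : haystack.toList ≠ needle.toList := fun hc => h1 (String.toList_inj.mp hc)
      exact pv_main haystack.toList needle.toList delim.toList hn hne _ 0 (by omega) (by omega)
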